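-- pv_equiv track=rewrite | github.com/numbbo/coco | code-postprocessing/cocopp/rungeneric.py | _split_short_opt_list
-- ===== SOURCE A (Python) =====
-- def _split_short_opt_list(short_opt_list):
--     """Split short options list used by getopt.
--
--     Returns a set of the options.
--
--     """
--     res = set()
--     tmp = short_opt_list[:]
--     # split into logical elements: one-letter that could be followed by colon
--     while tmp:
--         if len(tmp) > 1 and tmp[1] == ':':
--             res.add(tmp[0:2])
--             tmp = tmp[2:]
--         else:
--             res.add(tmp[0])
--             tmp = tmp[1:]
--
--     return res
-- ===== SOURCE B (Python) =====
-- def _split_short_opt_list(short_opt_list):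
--     """Split short options list used by getopt.
--
--     Returns a set of the options.
--
--     """
--     # Stage 1: tokenize by index jumps (no repeated re-slicing of the tail).
--     tokens = []
--     i = 0
--     n = len(short_opt_list)
--     while i < n:
--         j = i + 2 if i + 1 < n and short_opt_list[i + 1] == ':' else i + 1
--         tokens.append(short_opt_list[i:j])
--         i = j
--     # Stage 2: deduplicate once at the end.
--     return set(tokens)
-- ===== Notes on version B (the rewrite author's own statement) =====
-- stated objective: alternative
-- what changed: Replaced A's while-loop that repeatedly re-slices the remaining string and adds into a set as it goes with a two-stage index-jump tokenizer: first build the token list by advancing an index (O(1) per step), then deduplicate once with set() at the end.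
import Mathlib
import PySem

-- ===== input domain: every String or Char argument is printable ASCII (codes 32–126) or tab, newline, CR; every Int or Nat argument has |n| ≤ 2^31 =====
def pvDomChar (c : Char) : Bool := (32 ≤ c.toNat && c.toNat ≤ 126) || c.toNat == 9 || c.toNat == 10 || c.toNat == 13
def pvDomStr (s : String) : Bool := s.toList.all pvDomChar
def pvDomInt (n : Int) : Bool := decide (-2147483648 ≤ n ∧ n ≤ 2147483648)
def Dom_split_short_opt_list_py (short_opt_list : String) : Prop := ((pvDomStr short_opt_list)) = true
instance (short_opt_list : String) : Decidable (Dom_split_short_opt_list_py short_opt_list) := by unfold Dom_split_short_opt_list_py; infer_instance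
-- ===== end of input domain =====

-- ===== PORT A =====
-- B replaces A's incremental while-loop (re-slice the tail, add into the set as you go)
-- with a two-stage pass: tokenize first, deduplicate once at the end (objective: alternative).
-- Helper: A's while-loop, recursing on the remaining characters (tmp).
def pvGoA (res : PySem.Set String) (tmp : List Char) : PySem.Set String :=
  match tmp with
  | [] => res
  | [c] => PySem.Set.add res (String.ofList [c])
  | c :: d :: rest =>
    if d = ':' then pvGoA (PySem.Set.add res (String.ofList [c, d])) rest
    else pvGoA (PySem.Set.add res (String.ofList [c])) (d :: rest)

def split_short_opt_list_py (short_opt_list : String) : List String :=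
  pvGoA PySem.Set.empty short_opt_list.toList

-- ===== PORT B =====
-- Stage 1 of B: the index-jump tokenizer ('j = i+2 if s[i+1] == ":" else i+1'),
-- transcribed as structural recursion over the characters from position i on.
def pvTokens (cs : List Char) : List String :=
  match cs with
  | [] => []
  | c :: ':' :: rest => String.ofList [c, ':'] :: pvTokens rest
  | c :: rest => String.ofList [c] :: pvTokens rest

-- Stage 2 of B: set(tokens).
def split_short_opt_list_py_alt (short_opt_list : String) : List String :=
  PySem.Set.ofList (pvTokens short_opt_list.toList)

-- ===== PRECONDITION & SPEC =====
def Spec_split_short_opt_list_py (short_opt_list : String) (out : List String) : Prop := out = split_short_opt_list_py_alt short_opt_list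
instance (short_opt_list : String) (out : List String) : Decidable (Spec_split_short_opt_list_py short_opt_list out) := by unfold Spec_split_short_opt_list_py; infer_instance

-- ===== CLAIM =====
def Claim_equal_split_short_opt_list_py : Prop := ∀ (short_opt_list : String), Dom_split_short_opt_list_py short_opt_list → Spec_split_short_opt_list_py short_opt_list (split_short_opt_list_py short_opt_list)

-- ===== LEMMAS AND PROOFS =====
-- A's loop with accumulator res equals folding Set.add over B's token list starting from res.
theorem pvGoA_eq_foldl (n : Nat) : ∀ (cs : List Char), cs.length ≤ n → ∀ (res : PySem.Set String),
    pvGoA res cs = (pvTokens cs).foldl PySem.Set.add res := by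
  induction n with
  | zero =>
    intro cs h res
    match cs with
    | [] => rfl
    | _ :: _ => simp at h
  | succ n ih =>
    intro cs h res
    match cs with
    | [] => rfl
    | [c] => rfl
    | c :: d :: rest =>
      simp only [List.length_cons] at h
      by_cases hd : d = ':'
      · subst hd
        have h2 : pvGoA res (c :: ':' :: rest) =
            pvGoA (PySem.Set.add res (String.ofList [c, ':'])) rest := by
          conv_lhs => rw [pvGoA.eq_def]
          simp
        rw [h2, ih rest (by omega)]
        rfl
      · have h1 : pvTokens (c :: d :: rest) = String.ofList [c] :: pvTokens (d :: rest) := by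
          conv_lhs => rw [pvTokens.eq_def]
          split <;> simp_all
        have h2 : pvGoA res (c :: d :: rest) =
            pvGoA (PySem.Set.add res (String.ofList [c])) (d :: rest) := by
          conv_lhs => rw [pvGoA.eq_def]
          simp [hd]
        rw [h1, h2, ih (d :: rest) (by simp only [List.length_cons]; omega)]
        rfl

-- ===== VERDICT =====
theorem split_short_opt_list_py_spec : Claim_equal_split_short_opt_list_py := by
  intro s _
  show split_short_opt_list_py s = split_short_opt_list_py_alt s
  unfold split_short_opt_list_py split_short_opt_list_py_alt
  rw [PySem.Set.ofList_eq_foldl]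
  exact pvGoA_eq_foldl s.toList.length s.toList le_rfl PySem.Set.empty
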